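-- pv_equiv track=rewrite | github.com/UlsanCollege-English/week-14-problem-3-drawing-app-undo-stack-CoderRaaju | main.py | simulate_history
-- ===== SOURCE A (Python) =====
-- def simulate_history(actions):
--     """
--     Process a list of actions for a drawing app and apply UNDO behavior.
--
--     :param actions: list of strings; "UNDO" means remove the most recent action
--     :return: list of strings representing the remaining actions
--     """
--
--     stack = []  # this will hold active actions
--
--     for action in actions:
--         if action == "UNDO":
--             # pop only if the stack isn't empty
--             if stack:
--                 stack.pop()
--         else:
--             # push regular action
--             stack.append(action)
--
--     return stack
-- ===== SOURCE B (Python) =====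
-- def simulate_history(actions):
--     skip = 0
--     res = []
--     for action in reversed(actions):
--         if action == "UNDO":
--             skip += 1
--         elif skip > 0:
--             skip -= 1
--         else:
--             res.append(action)
--     res.reverse()
--     return res
-- ===== Notes on version B (the rewrite author's own statement) =====
-- stated objective: alternative
-- what changed: Replaces the forward push/pop stack simulation by a single backward pass keeping only an integer skip counter of pending undos, reversing the collected survivors at the end.
import Mathlib
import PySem

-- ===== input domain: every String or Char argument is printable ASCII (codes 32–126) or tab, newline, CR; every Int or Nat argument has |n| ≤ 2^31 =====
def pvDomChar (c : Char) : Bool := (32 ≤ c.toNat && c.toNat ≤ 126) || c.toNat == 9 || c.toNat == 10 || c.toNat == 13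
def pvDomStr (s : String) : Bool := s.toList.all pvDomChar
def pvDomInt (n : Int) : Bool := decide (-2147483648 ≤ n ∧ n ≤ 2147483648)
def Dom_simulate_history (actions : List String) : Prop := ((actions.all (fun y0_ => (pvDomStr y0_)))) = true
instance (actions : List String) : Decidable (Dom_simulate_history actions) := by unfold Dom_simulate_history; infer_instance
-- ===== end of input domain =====

-- B replaces A's forward push/pop stack by a backward pass with an integer skip counter (objective: alternative decomposition, same cost).

-- ===== PORT A =====
-- forward loop: push non-UNDO actions, pop on UNDO if stack nonempty
def simulate_history (actions : List String) : List String :=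
  actions.foldl
    (fun stack action =>
      if action = "UNDO" then
        if stack ≠ [] then stack.dropLast else stack
      else
        stack ++ [action])
    []

-- ===== PORT B =====
-- backward loop over reversed(actions) with (skip, res); res reversed at the end
def simulate_history_alt (actions : List String) : List String :=
  (actions.reverse.foldl
    (fun (st : Int × List String) action =>
      if action = "UNDO" then (st.1 + 1, st.2)
      else if st.1 > 0 then (st.1 - 1, st.2)
      else (st.1, st.2 ++ [action]))
    (0, [])).2.reverse

-- ===== PRECONDITION & SPEC =====
def Spec_simulate_history (actions : List String) (out : List String) : Prop := out = simulate_history_alt actions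
instance (actions : List String) (out : List String) : Decidable (Spec_simulate_history actions out) := by unfold Spec_simulate_history; infer_instance

-- ===== CLAIM (what is proved, stated in full; the proofs are below) =====
def Claim_equal_simulate_history : Prop := ∀ (actions : List String), Dom_simulate_history actions → Spec_simulate_history actions (simulate_history actions)

-- ===== LEMMAS AND PROOFS =====

-- the step functions, named for the lemmas
def pvStepA (stack : List String) (action : String) : List String :=
  if action = "UNDO" then
    if stack ≠ [] then stack.dropLast else stack
  else
    stack ++ [action]

def pvStepB (st : Int × List String) (action : String) : Int × List String :=
  if action = "UNDO" then (st.1 + 1, st.2)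
  else if st.1 > 0 then (st.1 - 1, st.2)
  else (st.1, st.2 ++ [action])

theorem pvPop_eq_take (S : List String) :
    (if S ≠ [] then S.dropLast else S) = S.take (S.length - 1) := by
  rcases S with _ | ⟨x, xs⟩
  · simp
  · simp [List.dropLast_eq_take]

theorem pvStepA_undo (S : List String) : pvStepA S "UNDO" = S.take (S.length - 1) := by
  rw [pvStepA, if_pos rfl, pvPop_eq_take]

-- main invariant: running B's backward loop over cs.reverse with skip counter k
-- appends to res the (k-popped) A-result of cs, reversed
theorem pvInvariant (cs : List String) : ∀ (k : Nat) (res : List String),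
    (cs.reverse.foldl pvStepB ((k : Int), res)).2
      = res ++ ((cs.foldl pvStepA []).take ((cs.foldl pvStepA []).length - k)).reverse := by
  induction cs using List.reverseRecOn with
  | nil => intro k res; simp
  | append_singleton cs x ih =>
    intro k res
    have hS : (cs ++ [x]).foldl pvStepA [] = pvStepA (cs.foldl pvStepA []) x := by
      simp [List.foldl_append]
    set S := cs.foldl pvStepA [] with hSdef
    rw [List.reverse_append, List.reverse_singleton, List.singleton_append,
      List.foldl_cons, hS]
    by_cases hx : x = "UNDO"
    · have h1 : pvStepB ((k : Int), res) x = ((k : Int) + 1, res) := by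
        simp [pvStepB, hx]
      rw [h1, hx, pvStepA_undo]
      have : ((k : Int) + 1) = ((k + 1 : Nat) : Int) := by push_cast; ring
      rw [this, ih (k + 1) res]
      congr 2
      rw [List.take_take, List.length_take]
      congr 1
      omega
    · rcases k with _ | k'
      · have h2 : pvStepA S x = S ++ [x] := by simp [pvStepA, hx]
        have h3 := ih 0 (res ++ [x])
        simp only [Nat.cast_zero] at h3 ⊢
        have h1 : pvStepB ((0 : Int), res) x = ((0 : Int), res ++ [x]) := by
          simp [pvStepB, hx]
        rw [h1, h2, h3]
        simp only [Nat.sub_zero, List.take_length, List.append_assoc]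
        simp [List.reverse_append]
      · have h1 : pvStepB (((k' + 1 : Nat) : Int), res) x = ((k' : Int), res) := by
          have hpos : ((k' + 1 : Nat) : Int) > 0 := by positivity
          simp only [pvStepB, if_neg hx, if_pos hpos]
          push_cast
          ring_nf
        have h2 : pvStepA S x = S ++ [x] := by simp [pvStepA, hx]
        rw [h1, h2, ih k' res]
        have hlen : (S ++ [x]).length - (k' + 1) = S.length - k' := by
          simp
        rw [hlen, List.take_append_of_le_length (Nat.sub_le _ _)]

-- ===== VERDICT (by name: the statement is the Claim_ definition above) =====
theorem simulate_history_spec : Claim_equal_simulate_history := by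
  intro actions _
  show simulate_history actions = simulate_history_alt actions
  have h := pvInvariant actions 0 []
  simp only [Nat.cast_zero, Nat.sub_zero, List.nil_append, List.take_length] at h
  unfold simulate_history simulate_history_alt
  change List.foldl pvStepA [] actions = (List.foldl pvStepB (0, []) actions.reverse).2.reverse
  rw [h, List.reverse_reverse]
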